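-- pv_equiv track=rewrite | github.com/workbuddy248/MVP | backend/src/core/azure_client.py | _optimize_prompt
-- ===== SOURCE A (Python) =====
-- def _optimize_prompt(prompt: str) -> str:
--     """Optimize prompt length to stay within token limits"""
--     if len(prompt) <= 0:
--         return prompt
--
--     # Truncate while preserving structure
--     lines = prompt.split('\n')
--     optimized_lines = []
--     current_length = 0
--
--     for line in lines:
--         if current_length + len(line) <= 1000000:
--             optimized_lines.append(line)
--             current_length += len(line)
--         else:
--             # Add truncation indicator
--             optimized_lines.append("... [content truncated for token limit]")
--             break
--
--     return '\n'.join(optimized_lines)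
-- ===== SOURCE B (Python) =====
-- def _optimize_prompt(prompt: str) -> str:
--     """Optimize prompt length to stay within token limits"""
--     if len(prompt) <= 0:
--         return prompt
--
--     lines = prompt.split('\n')
--     # Prefix-sum table: prefix[i] = total length of lines[0..i]
--     prefix = []
--     total = 0
--     for line in lines:
--         total += len(line)
--         prefix.append(total)
--     # First index whose cumulative length exceeds the limit, if any
--     cut = next((i for i in range(len(prefix)) if prefix[i] > 1000000), None)
--     if cut is None:
--         return '\n'.join(lines)
--     return '\n'.join(lines[:cut] + ["... [content truncated for token limit]"])
-- ===== Notes on version B (the rewrite author's own statement) =====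
-- stated objective: alternative
-- what changed: B replaces A's single accumulate-and-break loop that appends kept lines one by one with a prefix-sum table over the line lengths, a search for the first cumulative total exceeding the limit, and a slice lines[:cut] to build the result.
import Mathlib
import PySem

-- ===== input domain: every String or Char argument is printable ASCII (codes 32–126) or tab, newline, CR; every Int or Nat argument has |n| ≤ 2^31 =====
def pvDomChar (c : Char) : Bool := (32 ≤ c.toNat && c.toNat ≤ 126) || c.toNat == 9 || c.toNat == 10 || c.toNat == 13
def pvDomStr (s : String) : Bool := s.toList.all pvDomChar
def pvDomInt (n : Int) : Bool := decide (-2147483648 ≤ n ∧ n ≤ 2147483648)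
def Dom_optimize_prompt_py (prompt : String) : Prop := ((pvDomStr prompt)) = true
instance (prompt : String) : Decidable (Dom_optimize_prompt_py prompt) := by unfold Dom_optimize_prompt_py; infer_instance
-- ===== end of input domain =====

-- B replaces A's accumulate-and-break loop with a prefix-sum table, a first-exceeding search and a slice; alternative decomposition, same cost.

-- ===== PORT A =====
-- the for-loop of A: state = (optimized_lines, current_length); the else branch breaks
def pvLoopA : List String → List String → Int → List String
  | [], acc, _ => acc
  | l :: rest, acc, cur =>
    if cur + (PySem.Str.len l) ≤ 1000000 then
      pvLoopA rest (acc ++ [l]) (cur + (PySem.Str.len l))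
    else
      acc ++ ["... [content truncated for token limit]"]

def optimize_prompt_py (prompt : String) : String :=
  if PySem.Str.len prompt ≤ 0 then prompt
  else
    let lines := (PySem.Chars.splitOn prompt.toList "\n".toList).map String.ofList
    PySem.Str.join "\n" (pvLoopA lines [] 0)

-- ===== PORT B =====
-- Source B's prefix-sum loop: state = (prefix, total)
def pvPrefixB (lines : List String) : List Int :=
  (lines.foldl (fun (st : List Int × Int) l =>
    let t := st.2 + (PySem.Str.len l)
    (st.1 ++ [t], t)) ([], 0)).1

-- Source B's next(i for i in range(len(prefix)) if prefix[i] > 1000000)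
def pvFindCut : List Int → Nat → Option Nat
  | [], _ => none
  | p :: rest, i => if p > 1000000 then some i else pvFindCut rest (i + 1)

def optimize_prompt_py_alt (prompt : String) : String :=
  if PySem.Str.len prompt ≤ 0 then prompt
  else
    let lines := (PySem.Chars.splitOn prompt.toList "\n".toList).map String.ofList
    match pvFindCut (pvPrefixB lines) 0 with
    | none => PySem.Str.join "\n" lines
    | some cut => PySem.Str.join "\n" (lines.take cut ++ ["... [content truncated for token limit]"])

-- ===== PRECONDITION & SPEC =====
def Spec_optimize_prompt_py (prompt : String) (out : String) : Prop := out = optimize_prompt_py_alt prompt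
instance (prompt : String) (out : String) : Decidable (Spec_optimize_prompt_py prompt out) := by unfold Spec_optimize_prompt_py; infer_instance

-- ===== CLAIM (what is proved, stated in full; the proofs are below) =====
def Claim_equal_optimize_prompt_py : Prop := ∀ (prompt : String), Dom_optimize_prompt_py prompt → Spec_optimize_prompt_py prompt (optimize_prompt_py prompt)

-- ===== LEMMAS AND PROOFS =====

-- proof-side cutoff: index of the first line whose cumulative length (from cur) exceeds the limit
def pvCutSpec : List String → Int → Option Nat
  | [], _ => none
  | l :: rest, cur =>
    if cur + (PySem.Str.len l) ≤ 1000000 then (pvCutSpec rest (cur + PySem.Str.len l)).map (· + 1)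
    else some 0

-- proof-side prefix sums starting from t
def pvPrefFrom (t : Int) : List String → List Int
  | [] => []
  | l :: rest => (t + PySem.Str.len l) :: pvPrefFrom (t + PySem.Str.len l) rest

theorem pvLoopA_eq (lines : List String) : ∀ (acc : List String) (cur : Int),
    pvLoopA lines acc cur =
      acc ++ (match pvCutSpec lines cur with
              | none => lines
              | some c => lines.take c ++ ["... [content truncated for token limit]"]) := by
  induction lines with
  | nil => intro acc cur; simp [pvLoopA, pvCutSpec]
  | cons l rest ih =>
    intro acc cur
    by_cases h : cur + PySem.Str.len l ≤ 1000000
    · rw [pvLoopA, if_pos h, ih]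
      simp only [pvCutSpec, if_pos h]
      cases pvCutSpec rest (cur + PySem.Str.len l) <;>
        simp only [Option.map_none, Option.map_some, List.take_succ_cons, List.append_assoc,
          List.cons_append, List.nil_append]
    · rw [pvLoopA, if_neg h]
      simp only [pvCutSpec, if_neg h, List.take_zero, List.nil_append]

theorem pvPrefixB_fold (lines : List String) : ∀ (pre : List Int) (t : Int),
    (lines.foldl (fun (st : List Int × Int) l =>
      let u := st.2 + (PySem.Str.len l)
      (st.1 ++ [u], u)) (pre, t)).1 = pre ++ pvPrefFrom t lines := by
  induction lines with
  | nil => intro pre t; simp [pvPrefFrom]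
  | cons l rest ih =>
    intro pre t
    rw [List.foldl_cons]
    exact (ih (pre ++ [t + PySem.Str.len l]) (t + PySem.Str.len l)).trans
      (by simp [pvPrefFrom])

theorem pvFindCut_pref (lines : List String) : ∀ (t : Int) (i : Nat),
    pvFindCut (pvPrefFrom t lines) i = (pvCutSpec lines t).map (i + ·) := by
  induction lines with
  | nil => intro t i; simp [pvPrefFrom, pvFindCut, pvCutSpec]
  | cons l rest ih =>
    intro t i
    by_cases h : t + PySem.Str.len l ≤ 1000000
    · have h' : ¬ (t + PySem.Str.len l > 1000000) := by omega
      rw [pvPrefFrom, pvFindCut, if_neg h', ih]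
      simp only [pvCutSpec, if_pos h]
      cases pvCutSpec rest (t + PySem.Str.len l)
      · simp
      · simp; omega
    · have h' : t + PySem.Str.len l > 1000000 := by omega
      rw [pvPrefFrom, pvFindCut, if_pos h']
      simp only [pvCutSpec, if_neg h, Option.map_some]
      simp

-- ===== VERDICT (by name: the statement is the Claim_ definition above) =====
theorem optimize_prompt_py_spec : Claim_equal_optimize_prompt_py := by
  intro prompt _
  unfold Spec_optimize_prompt_py optimize_prompt_py optimize_prompt_py_alt
  by_cases h0 : PySem.Str.len prompt ≤ 0
  · rw [if_pos h0, if_pos h0]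
  · rw [if_neg h0, if_neg h0]
    have hB : pvPrefixB ((PySem.Chars.splitOn prompt.toList "\n".toList).map String.ofList) =
        pvPrefFrom 0 ((PySem.Chars.splitOn prompt.toList "\n".toList).map String.ofList) := by
      simpa [pvPrefixB] using
        pvPrefixB_fold ((PySem.Chars.splitOn prompt.toList "\n".toList).map String.ofList) [] 0
    simp only [pvLoopA_eq, hB, pvFindCut_pref, List.nil_append]
    cases pvCutSpec ((PySem.Chars.splitOn prompt.toList "\n".toList).map String.ofList) 0 <;> simp
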